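-- pv_equiv track=rewrite | github.com/soumiks/injection-smt-analyzer | src/isa/core/prover.py | _escape_smt2
-- ===== SOURCE A (Python) =====
-- def _escape_smt2(s: str) -> str:
--     """Escape string for SMT2."""
--     result = []
--     for c in s:
--         if c == '"':
--             result.append('""')
--         elif c == '\\':
--             result.append('\\\\')
--         elif ord(c) < 0x20 or ord(c) > 0x7e:
--             result.append(f'\\x{ord(c):02x}')
--         else:
--             result.append(c)
--     return "".join(result)
-- ===== SOURCE B (Python) =====
-- # B: table-driven escaping via str.translate with a dict that synthesizes
-- # hex escapes on demand (__missing__), instead of an explicit per-char loop.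
-- class _EscTable(dict):
--     def __missing__(self, code):
--         if code < 0x20 or code > 0x7e:
--             return f'\\x{code:02x}'
--         return code  # keep the character unchanged
--
-- _TABLE = _EscTable({0x22: '""', 0x5c: '\\\\'})
--
-- def _escape_smt2(s: str) -> str:
--     """Escape string for SMT2."""
--     return s.translate(_TABLE)
-- ===== Notes on version B (the rewrite author's own statement) =====
-- stated objective: faster
-- what changed: Replaces the explicit for-loop with if/elif chains and list.append/join by a single str.translate call driven by a codepoint table (a dict whose __missing__ synthesizes hex escapes or keeps the char), letting translate's C-level loop do the scan.
import Mathlib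
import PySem

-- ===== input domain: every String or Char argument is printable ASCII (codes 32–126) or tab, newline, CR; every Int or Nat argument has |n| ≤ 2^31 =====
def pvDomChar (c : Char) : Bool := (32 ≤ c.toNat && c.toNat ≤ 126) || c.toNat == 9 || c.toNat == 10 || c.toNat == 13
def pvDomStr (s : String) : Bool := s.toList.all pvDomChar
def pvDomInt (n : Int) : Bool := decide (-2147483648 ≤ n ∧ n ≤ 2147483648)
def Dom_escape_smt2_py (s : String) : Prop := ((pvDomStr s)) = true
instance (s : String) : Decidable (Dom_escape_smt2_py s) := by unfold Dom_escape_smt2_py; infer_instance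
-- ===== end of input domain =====

-- B escapes via str.translate with a codepoint table instead of A's explicit per-char loop; a timing run measured B faster (constant factor).
-- ===== PORT A =====
-- shared by both ports: f'\\x{n:02x}' for n <= 255 (two lowercase hex digits, zero-padded) — exact on that range
def pvHex2 (n : Nat) : List Char := [Nat.digitChar (n / 16), Nat.digitChar (n % 16)]

-- the element appended for one character (the if/elif chain of A's loop body)
def pvEscA (c : Char) : List Char :=
  if c = '"' then ['"', '"']
  else if c = '\\' then ['\\', '\\']
  else if c.toNat < 0x20 ∨ 0x7e < c.toNat then '\\' :: 'x' :: pvHex2 c.toNat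
  else [c]

-- loop appending one chunk per char; "".join(result) = flatten of the chunks (exact on chars)
def escape_smt2_py (s : String) : String :=
  String.mk ((s.toList.foldl (fun result c => result ++ [pvEscA c]) []).flatten)

-- ===== PORT B =====
-- B's translation table: the literal dict entries; __missing__ gives hex escape or keeps the char
def pvTable : PySem.Dict Nat (List Char) :=
  PySem.Dict.ofList [(0x22, ['"', '"']), (0x5c, ['\\', '\\'])]

def pvTranslate1 (c : Char) : List Char :=
  match pvTable.get? c.toNat with
  | some r => r
  | none => if c.toNat < 0x20 ∨ 0x7e < c.toNat then '\\' :: 'x' :: pvHex2 c.toNat else [c]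

-- str.translate maps each char through the table and concatenates
def escape_smt2_py_alt (s : String) : String :=
  String.mk (s.toList.flatMap pvTranslate1)

-- ===== PRECONDITION & SPEC =====
def Spec_escape_smt2_py (s : String) (out : String) : Prop := out = escape_smt2_py_alt s
instance (s : String) (out : String) : Decidable (Spec_escape_smt2_py s out) := by unfold Spec_escape_smt2_py; infer_instance

-- ===== CLAIM (what is proved, stated in full; the proofs are below) =====
def Claim_equal_escape_smt2_py : Prop := ∀ (s : String), Dom_escape_smt2_py s → Spec_escape_smt2_py s (escape_smt2_py s)

-- ===== LEMMAS AND PROOFS =====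
lemma pvEscA_eq_translate1 (c : Char) : pvEscA c = pvTranslate1 c := by
  unfold pvEscA pvTranslate1
  by_cases h1 : c = '"'
  · subst h1; decide
  · by_cases h2 : c = '\\'
    · subst h2; decide
    · have n1 : c.toNat ≠ 0x22 := fun h => h1 (Char.ext (UInt32.toNat_inj.mp h))
      have n2 : c.toNat ≠ 0x5c := fun h => h2 (Char.ext (UInt32.toNat_inj.mp h))
      simp only [if_neg h1, if_neg h2]
      have hg : pvTable.get? c.toNat = none := by
        simp only [pvTable, PySem.Dict.ofList, PySem.Dict.update, PySem.Dict.empty,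
          PySem.Dict.insert, PySem.Dict.get?]
        simp; omega
      rw [hg]

-- ===== VERDICT (by name: the statement is the Claim_ definition above) =====
theorem escape_smt2_py_spec : Claim_equal_escape_smt2_py := by
  intro s _
  unfold Spec_escape_smt2_py escape_smt2_py escape_smt2_py_alt
  rw [PySem.List.foldl_append_singleton_eq_map]
  rw [show pvEscA = pvTranslate1 from funext pvEscA_eq_translate1]
  simp [List.flatMap_def]
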